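-- pv_equiv track=rewrite | github.com/Thunderk3g/seo | backend/apps/seo_ai/agents/technical_audit.py | _bot_blocked
-- ===== SOURCE A (Python) =====
-- def _bot_blocked(robots_text: str, bot: str) -> bool:
--     """Heuristic: does any Disallow line target ``bot`` and forbid root?"""
--     if not robots_text:
--         return False
--     in_block = False
--     user_agent_match = False
--     for raw in robots_text.splitlines():
--         line = raw.split("#", 1)[0].strip()
--         if not line:
--             continue
--         lower = line.lower()
--         if lower.startswith("user-agent:"):
--             value = line.split(":", 1)[1].strip().lower()
--             user_agent_match = value == bot.lower() or value == "*"
--             in_block = user_agent_match and value == bot.lower()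
--         elif user_agent_match and lower.startswith("disallow:"):
--             value = line.split(":", 1)[1].strip()
--             # Disallow: / blocks everything.
--             if value == "/":
--                 # Only count "blocked" when the block actually named this bot.
--                 if in_block:
--                     return True
--     return False
-- ===== SOURCE B (Python) =====
-- def _bot_blocked(robots_text: str, bot: str) -> bool:
--     """Build an agent -> disallow-values table in one pass, then query it."""
--     table = {}
--     agent = None
--     for raw in robots_text.splitlines():
--         line = raw.split("#", 1)[0].strip()
--         if not line:
--             continue
--         lower = line.lower()
--         if lower.startswith("user-agent:"):
--             agent = line.split(":", 1)[1].strip().lower()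
--         elif lower.startswith("disallow:") and agent is not None:
--             table.setdefault(agent, []).append(line.split(":", 1)[1].strip())
--     return "/" in table.get(bot.lower(), ())
-- ===== Notes on version B (the rewrite author's own statement) =====
-- stated objective: alternative
-- what changed: Replaced A's early-returning two-flag state machine with a build-then-query decomposition: one pass builds a dict mapping each lowercased user-agent to the list of its Disallow values, then the answer is a single lookup '/' in table.get(bot.lower(), ()).
import Mathlib
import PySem

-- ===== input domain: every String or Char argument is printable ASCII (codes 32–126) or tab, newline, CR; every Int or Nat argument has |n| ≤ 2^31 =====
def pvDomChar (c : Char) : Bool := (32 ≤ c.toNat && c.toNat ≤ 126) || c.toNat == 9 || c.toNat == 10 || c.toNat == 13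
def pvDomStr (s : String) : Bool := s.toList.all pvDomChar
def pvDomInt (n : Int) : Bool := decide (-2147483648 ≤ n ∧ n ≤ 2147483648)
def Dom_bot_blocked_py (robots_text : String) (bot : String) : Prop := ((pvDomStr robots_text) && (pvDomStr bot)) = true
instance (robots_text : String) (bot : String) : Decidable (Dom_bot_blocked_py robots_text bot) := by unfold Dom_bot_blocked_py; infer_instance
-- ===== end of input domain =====

-- B replaces A's early-returning two-flag state machine by a build-a-table-then-query pass
-- (agent -> list of Disallow values), queried once after the loop; objective: alternative/simpler decomposition.


-- ===== PORT A =====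
-- raw.split("#", 1)[0].strip()  (split with non-empty sep is never none and always yields ≥ 1 piece, so [0] exists)
def pvCleanLine (raw : String) : String :=
  PySem.Str.strip (((PySem.Str.splitMax? raw "#" 1).getD []).headD "")
-- line.split(":", 1)[1]  (only evaluated under a startswith guard that guarantees a colon, so index 1 exists)
def pvColonTail (line : String) : String :=
  ((PySem.Str.splitMax? line ":" 1).getD []).getD 1 ""

def botLoopA (bot : String) : List String → Bool → Bool → Bool
  | [], _, _ => false
  | raw :: rest, user_agent_match, in_block =>
    let line := pvCleanLine raw
    if line = "" then botLoopA bot rest user_agent_match in_block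
    else
      let lower := PySem.Str.lower line
      if PySem.Str.startswith lower "user-agent:" then
        let value := PySem.Str.lower (PySem.Str.strip (pvColonTail line))
        let uam := (value == PySem.Str.lower bot) || (value == "*")
        botLoopA bot rest uam (uam && (value == PySem.Str.lower bot))
      else if user_agent_match && PySem.Str.startswith lower "disallow:" then
        let value := PySem.Str.strip (pvColonTail line)
        if value == "/" then
          if in_block then true
          else botLoopA bot rest user_agent_match in_block
        else botLoopA bot rest user_agent_match in_block
      else botLoopA bot rest user_agent_match in_block

def bot_blocked_py (robots_text : String) (bot : String) : Bool :=
  if robots_text = "" then false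
  else botLoopA bot (PySem.Str.splitlines robots_text) false false

-- ===== PORT B =====
def botBuildB : List String → Option String → PySem.Dict String (List String) → PySem.Dict String (List String)
  | [], _, table => table
  | raw :: rest, agent, table =>
    let line := pvCleanLine raw
    if line = "" then botBuildB rest agent table
    else
      let lower := PySem.Str.lower line
      if PySem.Str.startswith lower "user-agent:" then
        botBuildB rest (some (PySem.Str.lower (PySem.Str.strip (pvColonTail line)))) table
      else if PySem.Str.startswith lower "disallow:" then
        match agent with
        | some a => botBuildB rest agent (table.modify a [] (· ++ [PySem.Str.strip (pvColonTail line)]))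
        | none => botBuildB rest agent table
      else botBuildB rest agent table

def bot_blocked_py_alt (robots_text : String) (bot : String) : Bool :=
  ((botBuildB (PySem.Str.splitlines robots_text) none PySem.Dict.empty).getD
      (PySem.Str.lower bot) []).contains "/"

-- ===== PRECONDITION & SPEC =====
def Spec_bot_blocked_py (robots_text : String) (bot : String) (out : Bool) : Prop := out = bot_blocked_py_alt robots_text bot
instance (robots_text : String) (bot : String) (out : Bool) : Decidable (Spec_bot_blocked_py robots_text bot out) := by unfold Spec_bot_blocked_py; infer_instance

-- ===== CLAIM (what is proved, stated in full; the proofs are below) =====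
def Claim_equal_bot_blocked_py : Prop := ∀ (robots_text : String) (bot : String), Dom_bot_blocked_py robots_text bot → Spec_bot_blocked_py robots_text bot (bot_blocked_py robots_text bot)

-- ===== LEMMAS AND PROOFS =====
-- A's user-agent line flag update: (value==key or "*") and value==key collapses to value == key.
theorem pvAgentFlag (a b : String) : ((a == b || a == "*") && (a == b)) = decide (a = b) := by
  cases hb : a == b <;> simp_all

-- Loop invariant: A's in_block flag says exactly "the most recent user-agent value is bot.lower()"
-- (B's current agent), and in_block implies user_agent_match; then A's remaining loop returns True
-- exactly when B's table gains a "/" under bot.lower() from the remaining lines.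
set_option maxRecDepth 4096 in
theorem botLoop_eq (bot : String) (lines : List String) (agent : Option String)
    (table : PySem.Dict String (List String)) (uam ib : Bool)
    (h1 : ib = true → uam = true)
    (h2 : ib = decide (agent = some (PySem.Str.lower bot))) :
    ((botBuildB lines agent table).getD (PySem.Str.lower bot) []).contains "/"
      = (((table.getD (PySem.Str.lower bot) []).contains "/") || botLoopA bot lines uam ib) := by
  induction lines generalizing agent table uam ib with
  | nil => simp [botBuildB, botLoopA]
  | cons raw rest ih =>
    simp only [botBuildB, botLoopA]
    by_cases hl : pvCleanLine raw = ""
    · simp only [if_pos hl]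
      exact ih agent table uam ib h1 h2
    · simp only [if_neg hl]
      by_cases hua : PySem.Str.startswith (PySem.Str.lower (pvCleanLine raw)) "user-agent:" = true
      · simp only [if_pos hua]
        apply ih
        · intro h
          simp only [Bool.and_eq_true] at h
          exact h.1
        · simp only [Option.some.injEq]
          exact pvAgentFlag _ _
      · simp only [if_neg hua]
        by_cases hda : PySem.Str.startswith (PySem.Str.lower (pvCleanLine raw)) "disallow:" = true
        · simp only [hda, Bool.and_true]
          cases agent with
          | none =>
            have hib : ib = false := by simp [h2]
            subst hib
            refine (ih none table uam false h1 (by simp)).trans ?_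
            simp
          | some a =>
            set value := PySem.Str.strip (pvColonTail (pvCleanLine raw)) with hv
            refine (ih (some a) (table.modify a [] (· ++ [value])) uam ib h1 h2).trans ?_
            rw [PySem.Dict.getD_modify]
            by_cases hak : PySem.Str.lower bot = a
            · have hib : ib = true := by simp [h2, hak.symm]
              have huam : uam = true := h1 hib
              subst hib; subst huam
              simp only [if_pos hak, List.contains_append]
              by_cases hslash : (value == "/") = true
              · have hveq : value = "/" := by simpa using hslash
                simp [hveq]
              · have hvne : value ≠ "/" := by simpa using hslash
                simp [hslash, hak, Ne.symm hvne]
            · have hib : ib = false := by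
                simp only [h2, decide_eq_false_iff_not, Option.some.injEq]
                exact fun h => hak h.symm
              subst hib
              rw [if_neg hak]
              simp
        · simp only [hda, Bool.and_false, Bool.false_eq_true, if_false]
          cases agent with
          | none => exact ih none table uam ib h1 h2
          | some a => exact ih (some a) table uam ib h1 h2

-- ===== VERDICT (by name: the statement is the Claim_ definition above) =====
theorem bot_blocked_py_spec : Claim_equal_bot_blocked_py := by
  unfold Claim_equal_bot_blocked_py Spec_bot_blocked_py
  intro robots_text bot _
  unfold bot_blocked_py bot_blocked_py_alt
  by_cases h : robots_text = ""
  · subst h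
    have he : PySem.Str.splitlines "" = [] := rfl
    rw [he]
    simp [botBuildB, PySem.Dict.getD_empty]
  · rw [if_neg h,
      botLoop_eq bot (PySem.Str.splitlines robots_text) none PySem.Dict.empty false false
        (by simp) (by simp)]
    simp [PySem.Dict.getD_empty]
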